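-- pv_equiv track=rewrite | github.com/HugoPhibbs/COSC262_lab_work | Lab_1/sort_of.py | sort_of
-- ===== SOURCE A (Python) =====
-- def sort_of(numbers):
--     """docstring
--     formula for appearences = (og_position+1)-length(result)"""
--     result_list = [None] * len(numbers)
--     if len(numbers)==0:
--         return result_list
--     min_number = numbers[-1]
--     result_list[-1] = min_number
--     for i in range(1, len(numbers)+1):
--         if numbers[-i] < min_number:
--             min_number = numbers[-i]
--             result_list[-i] = min_number
--         else:
--             result_list[-i] = min_number
--     return result_list
-- ===== SOURCE B (Python) =====
-- def sort_of(numbers):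
--     """Suffix minima via sort: process (value, index) pairs in ascending order;
--     each pair whose index reaches past the filled prefix fills a whole segment
--     with its value, since every smaller value lies at an earlier index."""
--     res = [None] * len(numbers)
--     nxt = 0
--     for v, i in sorted((v, i) for i, v in enumerate(numbers)):
--         if i >= nxt:
--             res[nxt:i + 1] = [v] * (i + 1 - nxt)
--             nxt = i + 1
--     return res
-- ===== Notes on version B (the rewrite author's own statement) =====
-- stated objective: alternative
-- what changed: Replaced A's right-to-left running-minimum scan with negative-index writes by a sort-based sweep: sort the (value,index) pairs ascending and fill whole result segments left-to-right, since each pair whose index reaches past the already-filled prefix is the suffix minimum for every position up to its index.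
import Mathlib
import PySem

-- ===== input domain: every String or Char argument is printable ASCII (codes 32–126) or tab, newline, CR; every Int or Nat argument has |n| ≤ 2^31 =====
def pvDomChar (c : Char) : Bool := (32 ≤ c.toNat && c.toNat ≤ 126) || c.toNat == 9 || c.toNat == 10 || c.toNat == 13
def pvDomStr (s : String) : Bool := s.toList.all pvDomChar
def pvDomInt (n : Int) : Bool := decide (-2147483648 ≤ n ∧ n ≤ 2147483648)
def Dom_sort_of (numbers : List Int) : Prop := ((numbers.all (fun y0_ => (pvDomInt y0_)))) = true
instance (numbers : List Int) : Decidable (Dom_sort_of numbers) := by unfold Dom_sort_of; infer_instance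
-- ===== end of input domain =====

-- B replaces A's right-to-left running-minimum scan by a different algorithm: sort the
-- (value, index) pairs ascending and fill whole result segments left-to-right; same result,
-- an alternative O(n log n) strategy (not claimed faster).

-- ===== PORT A =====
-- [None] * len(numbers): every slot is overwritten before being returned in the non-empty
-- branch (and the empty branch returns []), so Int slots initialised with 0 are exact.
def sort_of (numbers : List Int) : List Int :=
  let result_list := List.replicate numbers.length (0 : Int)
  if numbers.length = 0 then result_list
  else
    let min_number := PySem.List.pyGetD numbers (-1) 0
    let result_list := PySem.List.pySetD result_list (-1) min_number
    let st := (PySem.List.pyRange 1 ((numbers.length : Int) + 1) 1).foldl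
      (fun (st : Int × List Int) (i : Int) =>
        let x := PySem.List.pyGetD numbers (-i) 0
        if x < st.1 then (x, PySem.List.pySetD st.2 (-i) x)
        else (st.1, PySem.List.pySetD st.2 (-i) st.1)) (min_number, result_list)
    st.2

-- ===== PORT B =====
-- one loop step of Source B: 'if i >= nxt: res[nxt:i+1] = [v]*(i+1-nxt); nxt = i+1'.
-- The slice assignment is ported by hand as take/replicate/drop; this is exact because the
-- replacement has exactly the slice's length and 0 ≤ nxt ≤ i+1 ≤ len(res) holds throughout.
def bstep (st : Int × List Int) (p : Int × Int) : Int × List Int :=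
  if st.1 ≤ p.2 then
    (p.2 + 1,
      st.2.take st.1.toNat ++ List.replicate (p.2 + 1 - st.1).toNat p.1
        ++ st.2.drop (p.2 + 1).toNat)
  else st

def sort_of_alt (numbers : List Int) : List Int :=
  -- res = [None] * len(numbers): every slot is overwritten (final nxt = len), 0 is exact
  let res := List.replicate numbers.length (0 : Int)
  let pairs := (PySem.List.enumerate numbers 0).map (fun iv => (iv.2, iv.1))
  ((PySem.List.sorted2 pairs Prod.fst Prod.snd).foldl bstep ((0 : Int), res)).2

-- ===== PRECONDITION & SPEC =====
def Spec_sort_of (numbers : List Int) (out : List Int) : Prop := out = sort_of_alt numbers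
instance (numbers : List Int) (out : List Int) : Decidable (Spec_sort_of numbers out) := by unfold Spec_sort_of; infer_instance

-- ===== CLAIM (what is proved, stated in full; the proofs are below) =====
def Claim_equal_sort_of : Prop := ∀ (numbers : List Int), Dom_sort_of numbers → Spec_sort_of numbers (sort_of numbers)

-- ===== LEMMAS AND PROOFS =====

-- the suffix-minimum list, structurally (proof-only reference implementation)
def suffMins : List Int → List Int
  | [] => []
  | x :: xs =>
    (match suffMins xs with
     | [] => x
     | m :: _ => min x m) :: suffMins xs

theorem suffMins_cons (x : Int) (xs : List Int) :
    suffMins (x :: xs)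
      = (match suffMins xs with | [] => x | r :: _ => min x r) :: suffMins xs := rfl

theorem length_suffMins (xs : List Int) : (suffMins xs).length = xs.length := by
  induction xs with
  | nil => rfl
  | cons x t ih => rw [suffMins_cons]; simp [ih]

theorem suffMins_ne_nil (xs : List Int) (h : xs ≠ []) : suffMins xs ≠ [] := by
  cases xs with
  | nil => exact absurd rfl h
  | cons x t => rw [suffMins_cons]; simp

-- ===== A-side: the backward loop computes suffMins =====

-- setting the last slot of the zero block prepending to the computed suffix
theorem set_replicate_append (j : Nat) (L : List Int) (v : Int) :
    (List.replicate (j + 1) (0 : Int) ++ L).set j v = List.replicate j (0 : Int) ++ v :: L := by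
  induction j with
  | zero => simp
  | succ k ih =>
      have h2 : List.replicate (k + 2) (0 : Int) = 0 :: List.replicate (k + 1) 0 := rfl
      rw [h2, List.cons_append, List.set, ih, List.replicate_succ, List.cons_append]

-- negative write: for 1 ≤ k ≤ len, xs[-k] = v is set at len - k
theorem pySetD_neg (xs : List Int) (k : Nat) (v : Int) (h1 : 0 < k) (h2 : k ≤ xs.length) :
    PySem.List.pySetD xs (-(k : Int)) v = xs.set (xs.length - k) v := by
  simp [PySem.List.pySetD, PySem.List.pySet?, PySem.List.pyIdx?]
  rw [if_neg (by omega), if_pos h2]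
  simp

theorem pySetD_neg_one_last (L : List Int) (x : Int) :
    PySem.List.pySetD (L ++ [x]) (-1) x = L ++ [x] := by
  have h := pySetD_neg (L ++ [x]) 1 x (by omega) (by simp)
  simp only [Int.natCast_one] at h
  rw [h]
  simp

theorem pyGetD_neg (xs : List Int) (k : Nat) (h1 : 0 < k) (h2 : k ≤ xs.length) :
    PySem.List.pyGetD xs (-(k : Int)) 0 = xs.getD (xs.length - k) 0 := by
  have := PySem.List.pyGetD_neg_natCast (xs := xs) (k := k) (d := (0:Int)) h1 h2
  rw [this, List.getD_eq_getElem _ _ (by omega)]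

-- drop (n-k-1) = numbers[n-k-1] :: drop (n-k)
theorem drop_cons_of_lt (xs : List Int) (j : Nat) (h : j < xs.length) :
    xs.drop j = xs.getD j 0 :: xs.drop (j + 1) := by
  rw [List.getD_eq_getElem _ _ h]
  exact (List.drop_eq_getElem_cons h)

-- A's loop invariant: after folding over range(1, k+1), the state is
-- (head of suffix-mins of the last k elements, zeros ++ that suffix-min list).
theorem loop_invariant (numbers : List Int) (hne : numbers ≠ []) (k : Nat)
    (h1 : 1 ≤ k) (h2 : k ≤ numbers.length) :
    (PySem.List.pyRange 1 ((k : Int) + 1) 1).foldl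
      (fun (st : Int × List Int) (i : Int) =>
        let x := PySem.List.pyGetD numbers (-i) 0
        if x < st.1 then (x, PySem.List.pySetD st.2 (-i) x)
        else (st.1, PySem.List.pySetD st.2 (-i) st.1))
      (PySem.List.pyGetD numbers (-1) 0,
       PySem.List.pySetD (List.replicate numbers.length (0 : Int)) (-1)
         (PySem.List.pyGetD numbers (-1) 0))
    = ((suffMins (numbers.drop (numbers.length - k))).headD 0,
       List.replicate (numbers.length - k) (0 : Int) ++ suffMins (numbers.drop (numbers.length - k))) := by
  induction k with
  | zero => omega
  | succ k ih =>
      have hn : 0 < numbers.length := List.length_pos_iff.mpr hne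
      by_cases hk1 : k = 0
      · -- base case k+1 = 1
        subst hk1
        push_cast
        have hr : PySem.List.pyRange 1 (2 : Int) 1 = [1] := by
          have := PySem.List.pyRange_one_singleton (1 : Int)
          norm_num at this ⊢
          exact this
        rw [hr]
        simp only [List.foldl_cons, List.foldl_nil]
        -- the single step at i = 1
        have hget : PySem.List.pyGetD numbers (-1) 0 = numbers.getD (numbers.length - 1) 0 := by
          have := pyGetD_neg numbers 1 (by omega) (by omega)
          simpa using this
        have hset : ∀ v : Int, PySem.List.pySetD (List.replicate numbers.length (0:Int)) (-1) v
            = List.replicate (numbers.length - 1) (0:Int) ++ [v] := by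
          intro v
          have h := pySetD_neg (List.replicate numbers.length (0:Int)) 1 v (by omega) (by simpa using hn)
          simp only [Int.natCast_one] at h
          rw [h]
          simp only [List.length_replicate]
          have hrep : List.replicate numbers.length (0:Int)
              = List.replicate ((numbers.length - 1) + 1) (0:Int) ++ ([] : List Int) := by
            rw [List.append_nil]; congr 1; omega
          rw [hrep, set_replicate_append]
        have hdrop : numbers.drop (numbers.length - 1) = [numbers.getD (numbers.length - 1) 0] := by
          rw [drop_cons_of_lt numbers (numbers.length - 1) (by omega)]
          simp [Nat.sub_add_cancel hn]
        simp only [hset, hget, if_neg (lt_irrefl _)]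
        rw [pySetD_neg_one_last, hdrop]
        simp [suffMins]
      · -- inductive step: range 1 (k+2) = range 1 (k+1) ++ [k+1]
        have hk : 1 ≤ k := by omega
        have hr : PySem.List.pyRange 1 ((k:Int) + 1 + 1) 1
            = PySem.List.pyRange 1 ((k:Int) + 1) 1 ++ [(k:Int) + 1] := by
          have := PySem.List.pyRange_one_succ_right (a := 1) (b := (k:Int) + 1) (by omega)
          simpa using this
        push_cast
        rw [hr, List.foldl_append, ih hk (by omega)]
        simp only [List.foldl_cons, List.foldl_nil]
        set j := numbers.length - (k + 1) with hj
        have hjlt : j < numbers.length := by omega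
        have hdrop : numbers.drop j = numbers.getD j 0 :: numbers.drop (numbers.length - k) := by
          rw [drop_cons_of_lt numbers j hjlt]; congr 2; omega
        have hget : PySem.List.pyGetD numbers (-((k:Int)+1)) 0 = numbers.getD j 0 := by
          have := pyGetD_neg numbers (k+1) (by omega) (by omega)
          rw [show (-((k:Int)+1)) = -((k+1 : Nat) : Int) by push_cast; ring, this]
        have hS : suffMins (numbers.drop (numbers.length - k)) ≠ [] :=
          suffMins_ne_nil _ (by
            intro h
            have := congrArg List.length h
            simp at this
            omega)
        obtain ⟨r, S', hSS⟩ := List.exists_cons_of_ne_nil hS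
        have hlenS : (r :: S').length = k := by
          rw [← hSS, length_suffMins, List.length_drop]; omega
        have hset : ∀ v : Int,
            PySem.List.pySetD (List.replicate (numbers.length - k) (0:Int) ++ (r :: S')) (-((k:Int)+1)) v
            = List.replicate j (0:Int) ++ v :: r :: S' := by
          intro v
          have hlen : (List.replicate (numbers.length - k) (0:Int) ++ (r :: S')).length = numbers.length := by
            simp [hlenS]; omega
          have := pySetD_neg (List.replicate (numbers.length - k) (0:Int) ++ (r :: S')) (k+1) v
            (by omega) (by rw [hlen]; omega)
          rw [show (-((k:Int)+1)) = -((k+1 : Nat) : Int) by push_cast; ring, this, hlen]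
          have hrep : List.replicate (numbers.length - k) (0:Int)
              = List.replicate (j + 1) (0:Int) := by congr 1; omega
          rw [hrep, set_replicate_append]
        rw [hSS]
        have hnewdrop : suffMins (numbers.drop j) = min (numbers.getD j 0) r :: r :: S' := by
          rw [hdrop, suffMins_cons, hSS]
        simp only [hget]
        by_cases hlt : numbers.getD j 0 < r
        · rw [if_pos (by simpa [hSS] using hlt)]
          simp only [hset]
          rw [hnewdrop, min_eq_left (le_of_lt hlt)]
          simp
        · rw [if_neg (by simpa [hSS] using hlt)]
          simp only [hset]
          rw [hnewdrop, min_eq_right (le_of_not_gt hlt)]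
          simp

theorem sort_of_eq_suffMins (numbers : List Int) : sort_of numbers = suffMins numbers := by
  unfold sort_of
  by_cases hnil : numbers = []
  · subst hnil; rfl
  · have hn : 0 < numbers.length := List.length_pos_iff.mpr hnil
    simp only [if_neg (by omega : ¬ numbers.length = 0)]
    have := loop_invariant numbers hnil numbers.length hn le_rfl
    simp only [this]
    simp

-- ===== B-side: the sort-and-fill fold computes suffMins =====

-- suffMins characterisation: entry p is the minimum of the suffix from p
theorem suffMins_spec (xs : List Int) (p : Nat) (hp : p < xs.length) :
    (∀ q : Nat, p ≤ q → q < xs.length → (suffMins xs).getD p 0 ≤ xs.getD q 0) ∧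
    (∃ q : Nat, p ≤ q ∧ q < xs.length ∧ (suffMins xs).getD p 0 = xs.getD q 0) := by
  induction xs generalizing p with
  | nil => simp at hp
  | cons x t ih =>
      cases p with
      | zero =>
          cases t with
          | nil =>
              refine ⟨?_, 0, le_rfl, by simp, by simp [suffMins]⟩
              intro q _ hq
              simp only [List.length_cons, List.length_nil] at hq
              have hq0 : q = 0 := by omega
              subst hq0
              simp [suffMins]
          | cons y t' =>
              have hne : suffMins (y :: t') ≠ [] := suffMins_ne_nil _ (by simp)
              obtain ⟨m, rest, hm⟩ := List.exists_cons_of_ne_nil hne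
              have hhead : (suffMins (x :: y :: t')).getD 0 0 = min x m := by
                rw [suffMins_cons, hm]; rfl
              have hm0 : (suffMins (y :: t')).getD 0 0 = m := by rw [hm]; rfl
              have ihm := ih 0 (by simp)
              constructor
              · intro q _ hq
                cases q with
                | zero =>
                    rw [hhead]; exact min_le_left _ _
                | succ q' =>
                    have h2 := ihm.1 q' (Nat.zero_le _) (by simpa using Nat.lt_of_succ_lt_succ hq)
                    rw [hm0] at h2
                    rw [hhead]
                    exact le_trans (min_le_right _ _) h2
              · rcases le_total x m with hxm | hmx
                · exact ⟨0, le_rfl, by simp, by rw [hhead, min_eq_left hxm]; simp⟩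
                · obtain ⟨q', _, hq'lt, heq⟩ := ihm.2
                  rw [hm0] at heq
                  exact ⟨q' + 1, Nat.zero_le _, by simpa using Nat.succ_lt_succ hq'lt,
                    by rw [hhead, min_eq_right hmx]; simpa using heq⟩
      | succ p' =>
          have hp' : p' < t.length := by simpa using Nat.lt_of_succ_lt_succ hp
          have hshift : (suffMins (x :: t)).getD (p' + 1) 0 = (suffMins t).getD p' 0 := by
            rw [suffMins_cons]; rfl
          obtain ⟨ih1, ih2⟩ := ih p' hp'
          constructor
          · intro q hq hqlt
            cases q with
            | zero => omega
            | succ q' =>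
                have := ih1 q' (Nat.le_of_succ_le_succ hq) (by simpa using Nat.lt_of_succ_lt_succ hqlt)
                rw [hshift]
                simpa using this
          · obtain ⟨q', hq1, hq2, heq⟩ := ih2
            exact ⟨q' + 1, Nat.succ_le_succ hq1, by simpa using Nat.succ_lt_succ hq2,
              by rw [hshift]; simpa using heq⟩

-- the lexicographic tuple comparison sorted2 uses with keys fst, snd
def bef (a b : Int × Int) : Bool := decide (a.1 < b.1) || (!decide (b.1 < a.1) && decide (a.2 < b.2))

theorem sorted2_eq_foldl (xs : List (Int × Int)) :
    PySem.List.sorted2 xs Prod.fst Prod.snd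
      = xs.foldl (fun acc x => PySem.List.insertBy bef x acc) [] := rfl

theorem insertBy_bef_nil (x : Int × Int) : PySem.List.insertBy bef x [] = [x] := rfl

theorem insertBy_bef_cons (x y : Int × Int) (ys : List (Int × Int)) :
    PySem.List.insertBy bef x (y :: ys)
      = if bef x y then x :: y :: ys else y :: PySem.List.insertBy bef x ys := rfl

theorem bef_asymm (a b : Int × Int) (h : bef a b = true) : bef b a = false := by
  simp only [bef, Bool.or_eq_true, Bool.and_eq_true, Bool.or_eq_false_iff, Bool.and_eq_false_iff,
    Bool.not_eq_true', Bool.not_eq_false', decide_eq_true_eq, decide_eq_false_iff_not] at *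
  omega

theorem bef_trans_false (a b c : Int × Int) (h1 : bef b a = false) (h2 : bef c b = false) :
    bef c a = false := by
  simp only [bef, Bool.or_eq_false_iff, Bool.and_eq_false_iff,
    Bool.not_eq_false', decide_eq_true_eq, decide_eq_false_iff_not] at *
  omega

theorem fst_le_of_bef_false (a b : Int × Int) (h : bef b a = false) : a.1 ≤ b.1 := by
  simp only [bef, Bool.or_eq_false_iff, Bool.and_eq_false_iff,
    Bool.not_eq_false', decide_eq_true_eq, decide_eq_false_iff_not] at *
  omega

theorem pairwise_insertBy_bef (x : Int × Int) (ys : List (Int × Int))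
    (h : ys.Pairwise (fun a b => bef b a = false)) :
    (PySem.List.insertBy bef x ys).Pairwise (fun a b => bef b a = false) := by
  induction ys with
  | nil => simp [insertBy_bef_nil]
  | cons y ys ih =>
      rw [insertBy_bef_cons]
      rcases List.pairwise_cons.mp h with ⟨hy, hys⟩
      by_cases hb : bef x y = true
      · rw [if_pos hb]
        refine List.pairwise_cons.mpr ⟨?_, h⟩
        intro z hz
        rcases List.mem_cons.mp hz with rfl | hz
        · exact bef_asymm _ _ hb
        · exact bef_trans_false _ _ _ (bef_asymm _ _ hb) (hy z hz)
      · rw [if_neg hb]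
        refine List.pairwise_cons.mpr ⟨?_, ih hys⟩
        intro z hz
        rcases (PySem.List.mem_insertBy bef x z ys).mp hz with rfl | hz
        · exact Bool.eq_false_iff.mpr hb
        · exact hy z hz

theorem pairwise_foldl_insertBy_bef (xs : List (Int × Int)) (acc : List (Int × Int))
    (h : acc.Pairwise (fun a b => bef b a = false)) :
    (xs.foldl (fun acc x => PySem.List.insertBy bef x acc) acc).Pairwise
      (fun a b => bef b a = false) := by
  induction xs generalizing acc with
  | nil => simpa using h
  | cons x xs ih => exact ih _ (pairwise_insertBy_bef x acc h)

theorem sorted2_pairwise_fst_le (xs : List (Int × Int)) :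
    (PySem.List.sorted2 xs Prod.fst Prod.snd).Pairwise (fun a b => a.1 ≤ b.1) := by
  rw [sorted2_eq_foldl]
  exact (pairwise_foldl_insertBy_bef xs [] (by simp)).imp
    (fun h => fst_le_of_bef_false _ _ h)

theorem mem_enumerate_iff (xs : List Int) (s : Int) (p : Int × Int) :
    p ∈ PySem.List.enumerate xs s ↔ ∃ q : Nat, q < xs.length ∧ p = (s + (q : Int), xs.getD q 0) := by
  induction xs generalizing s with
  | nil => simp [PySem.List.enumerate]
  | cons x t ih =>
      have hcons : PySem.List.enumerate (x :: t) s = (s, x) :: PySem.List.enumerate t (s + 1) := rfl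
      rw [hcons]
      simp only [List.mem_cons, ih]
      constructor
      · rintro (rfl | ⟨q, hq, rfl⟩)
        · exact ⟨0, by simp, by simp⟩
        · refine ⟨q + 1, by simpa using Nat.succ_lt_succ hq, ?_⟩
          have h2 : (x :: t).getD (q + 1) 0 = t.getD q 0 := rfl
          have h1 : s + (((q + 1 : Nat)) : Int) = s + 1 + (q : Int) := by push_cast; ring
          rw [h2, h1]
      · rintro ⟨q, hq, rfl⟩
        cases q with
        | zero => left; simp
        | succ q' =>
            right
            refine ⟨q', by simpa using Nat.lt_of_succ_lt_succ hq, ?_⟩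
            have h2 : (x :: t).getD (q' + 1) 0 = t.getD q' 0 := rfl
            have h1 : s + (((q' + 1 : Nat)) : Int) = s + 1 + (q' : Int) := by push_cast; ring
            rw [h2, h1]

-- the B fold's invariant: positions below nxt already hold the suffix minima, every
-- still-unfilled index's pair is still ahead, and pairs ahead are sorted by value
theorem bfold_inv (xs : List Int) (S : List (Int × Int)) (k : Nat) (res : List Int)
    (hk : k ≤ xs.length) (hlen : res.length = xs.length)
    (hdone : ∀ p : Nat, p < k → res.getD p 0 = (suffMins xs).getD p 0)
    (hrem : ∀ q : Nat, k ≤ q → q < xs.length → (xs.getD q 0, (q : Int)) ∈ S)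
    (hfrom : ∀ vi ∈ S, ∃ q : Nat, q < xs.length ∧ vi = (xs.getD q 0, (q : Int)))
    (hsorted : S.Pairwise (fun a b => a.1 ≤ b.1)) :
    (S.foldl bstep ((k : Int), res)).2 = suffMins xs := by
  induction S generalizing k res with
  | nil =>
      have hkn : k = xs.length := by
        by_contra h
        exact absurd (hrem k le_rfl (lt_of_le_of_ne hk h)) (List.not_mem_nil)
      simp only [List.foldl_nil]
      apply List.ext_getElem (by rw [hlen, length_suffMins])
      intro i h1 h2
      have hik : i < k := by omega
      have := hdone i hik
      rwa [List.getD_eq_getElem _ _ h1, List.getD_eq_getElem _ _ h2] at this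
  | cons hd tl ih =>
      obtain ⟨q0, hq0n, rfl⟩ := hfrom hd (List.mem_cons_self)
      rw [List.foldl_cons]
      by_cases hcase : (k : Int) ≤ (q0 : Int)
      · -- fill positions [k, q0] with xs[q0], advance nxt to q0+1
        have hkq0 : k ≤ q0 := by exact_mod_cast hcase
        have hstep : bstep ((k : Int), res) (xs.getD q0 0, (q0 : Int))
            = (((q0 + 1 : Nat) : Int),
               res.take k ++ List.replicate (q0 + 1 - k) (xs.getD q0 0) ++ res.drop (q0 + 1)) := by
          unfold bstep
          rw [if_pos hcase]
          have e1 : ((k : Int)).toNat = k := by omega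
          have e2 : ((q0 : Int) + 1 - (k : Int)).toNat = q0 + 1 - k := by omega
          have e3 : ((q0 : Int) + 1).toNat = q0 + 1 := by omega
          simp only [e1, e2, e3]
          rw [Prod.mk.injEq]
          exact ⟨by push_cast; ring, rfl⟩
        rw [hstep]
        have hlen' : (res.take k ++ List.replicate (q0 + 1 - k) (xs.getD q0 0)
            ++ res.drop (q0 + 1)).length = xs.length := by
          simp [List.length_take, List.length_drop, hlen]
          omega
        apply ih (q0 + 1) _ (by omega) hlen'
        · -- hdone for the new prefix
          intro p hp
          have htk : (res.take k).length = k := by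
            rw [List.length_take]; omega
          by_cases hpk : p < k
          · rw [List.getD_append _ _ _ _ (by rw [List.length_append, htk]; omega),
              List.getD_append _ _ _ _ (by omega)]
            rw [List.getD_eq_getElem _ _ (by omega)]
            rw [List.getElem_take]
            rw [← List.getD_eq_getElem _ _ (by omega)]
            exact hdone p hpk
          · -- k ≤ p ≤ q0: the filled value is the suffix minimum at p
            have hpk' : k ≤ p := Nat.le_of_not_lt hpk
            have hpq0 : p ≤ q0 := by omega
            have hpn : p < xs.length := by omega
            have hmid : (res.take k ++ List.replicate (q0 + 1 - k) (xs.getD q0 0)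
                ++ res.drop (q0 + 1)).getD p 0 = xs.getD q0 0 := by
              rw [List.getD_append _ _ _ _ (by
                rw [List.length_append, htk, List.length_replicate]; omega)]
              rw [List.getD_append_right _ _ _ _ (by rw [htk]; omega)]
              rw [htk]
              rw [List.getD_eq_getElem _ _ (by rw [List.length_replicate]; omega)]
              simp
            rw [hmid]
            obtain ⟨hmin, q', hq'1, hq'2, heq⟩ := suffMins_spec xs p hpn
            have h1 : (suffMins xs).getD p 0 ≤ xs.getD q0 0 := hmin q0 hpq0 hq0n
            have h2 : xs.getD q0 0 ≤ (suffMins xs).getD p 0 := by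
              rw [heq]
              have hq'mem := hrem q' (by omega) hq'2
              rcases List.mem_cons.mp hq'mem with hhd | htl
              · have : xs.getD q' 0 = xs.getD q0 0 := congrArg Prod.fst hhd
                rw [this]
              · have hle := (List.pairwise_cons.mp hsorted).1 _ htl
                simpa using hle
            omega
        · -- hrem: indices past q0 keep their pairs ahead
          intro q hq1 hq2
          have hmem := hrem q (by omega) hq2
          rcases List.mem_cons.mp hmem with hhd | htl
          · exfalso
            have : (q : Int) = (q0 : Int) := congrArg Prod.snd hhd
            have : q = q0 := by exact_mod_cast this
            omega
          · exact htl
        · exact fun vi hvi => hfrom vi (List.mem_cons_of_mem _ hvi)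
        · exact (List.pairwise_cons.mp hsorted).2
      · -- the pair's index is already filled: state unchanged
        have hstep : bstep ((k : Int), res) (xs.getD q0 0, (q0 : Int)) = ((k : Int), res) := by
          unfold bstep
          rw [if_neg hcase]
        rw [hstep]
        apply ih k res hk hlen hdone
        · intro q hq1 hq2
          have hmem := hrem q hq1 hq2
          rcases List.mem_cons.mp hmem with hhd | htl
          · exfalso
            have h1 : (q : Int) = (q0 : Int) := congrArg Prod.snd hhd
            have h2 : q = q0 := by exact_mod_cast h1
            omega
          · exact htl
        · exact fun vi hvi => hfrom vi (List.mem_cons_of_mem _ hvi)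
        · exact (List.pairwise_cons.mp hsorted).2

theorem sort_of_alt_eq_suffMins (xs : List Int) : sort_of_alt xs = suffMins xs := by
  unfold sort_of_alt
  have h0 : ((0 : Nat) : Int) = (0 : Int) := rfl
  rw [← h0]
  apply bfold_inv xs _ 0 _ (Nat.zero_le _) (by simp)
  · intro p hp; omega
  · intro q _ hq
    rw [List.Perm.mem_iff (PySem.List.sorted2_perm _ _ _ _)]
    rw [List.mem_map]
    refine ⟨((q : Int), xs.getD q 0), ?_, rfl⟩
    rw [mem_enumerate_iff]
    exact ⟨q, hq, by simp⟩
  · intro vi hvi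
    have hvi' := (List.Perm.mem_iff (PySem.List.sorted2_perm _ _ _ _)).mp hvi
    obtain ⟨iv, hiv, rfl⟩ := List.mem_map.mp hvi'
    obtain ⟨q, hq, rfl⟩ := (mem_enumerate_iff _ _ _).mp hiv
    exact ⟨q, hq, by simp⟩
  · exact sorted2_pairwise_fst_le _

-- ===== VERDICT (by name: the statement is the Claim_ definition above) =====
theorem sort_of_spec : Claim_equal_sort_of := by
  intro numbers _
  unfold Spec_sort_of
  rw [sort_of_eq_suffMins, sort_of_alt_eq_suffMins]
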